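-- pv_equiv track=rewrite | github.com/CESNET/dp3 | dp3/snapshots/snapshot_hooks.py | _get_root_cycles
-- ===== SOURCE A (Python) =====
-- from collections import defaultdict
-- from itertools import combinations
--
-- def _get_root_cycles(path: list[tuple[str, str]]) -> list[tuple[int, int]]:
--     """
--     Collects indexes of entities on the path, and returns a list of "root cycles"
--     A root cycle is defined using tuple of (start_index, end_index) in the path.
--     Examines all possible combinations of backlink cycles,
--     but returns only ones not completely inside any other existing cycle.
--
--     Args:
--         path: A resolved link path of tuples (entity_name, attr_name).
--     Returns:
--         Empty list if path contains no cycles,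
--         a list of all possible "root cycle" combinations otherwise.
--     """
--     entity_indexes: defaultdict[str, list[int]] = defaultdict(list)
--     for i, (entity, _attr) in enumerate(path):
--         entity_indexes[entity].append(i)
--
--     if not any(len(indexes) > 1 for indexes in entity_indexes.values()):
--         return []
--
--     possible_backlinks = [
--         combination
--         for indexes in entity_indexes.values()
--         for combination in combinations(indexes, 2)
--     ]
--     return [
--         (curr_beg, curr_end)
--         for curr_beg, curr_end in possible_backlinks
--         if not any(beg < curr_beg and curr_end < end for beg, end in possible_backlinks)
--     ]
-- ===== SOURCE B (Python) =====
-- from itertools import combinations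
--
-- def _get_root_cycles(path: list[tuple[str, str]]) -> list[tuple[int, int]]:
--     """Bucket + prefix-max re-implementation: one (first, last) interval per
--     repeated entity, an O(n) prefix-max table of cycle ends indexed by begin,
--     then an O(1) dominance test per candidate pair (A rescans all pairs)."""
--     entity_indexes: dict[str, list[int]] = {}
--     for i, (entity, _attr) in enumerate(path):
--         entity_indexes.setdefault(entity, []).append(i)
--     groups = [g for g in entity_indexes.values() if len(g) > 1]
--
--     n = len(path)
--     # best_end[b] = maximal end of any backlink cycle whose begin is < b
--     best_end = [-1] * (n + 1)
--     for g in groups: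
--         if best_end[g[0] + 1] < g[-1]:
--             best_end[g[0] + 1] = g[-1]
--     for i in range(n):
--         if best_end[i + 1] < best_end[i]:
--             best_end[i + 1] = best_end[i]
--
--     result = []
--     for g in groups:
--         for beg, end in combinations(g, 2):
--             if best_end[beg] <= end:
--                 result.append((beg, end))
--     return result
-- ===== Notes on version B (the rewrite author's own statement) =====
-- stated objective: faster
-- what changed: Instead of rescanning the whole pair list for every candidate pair, B builds one (first,last) interval per repeated entity, buckets the interval ends by begin into an array and takes a prefix maximum, so each candidate is tested for strict containment in O(1).
import Mathlib
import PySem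

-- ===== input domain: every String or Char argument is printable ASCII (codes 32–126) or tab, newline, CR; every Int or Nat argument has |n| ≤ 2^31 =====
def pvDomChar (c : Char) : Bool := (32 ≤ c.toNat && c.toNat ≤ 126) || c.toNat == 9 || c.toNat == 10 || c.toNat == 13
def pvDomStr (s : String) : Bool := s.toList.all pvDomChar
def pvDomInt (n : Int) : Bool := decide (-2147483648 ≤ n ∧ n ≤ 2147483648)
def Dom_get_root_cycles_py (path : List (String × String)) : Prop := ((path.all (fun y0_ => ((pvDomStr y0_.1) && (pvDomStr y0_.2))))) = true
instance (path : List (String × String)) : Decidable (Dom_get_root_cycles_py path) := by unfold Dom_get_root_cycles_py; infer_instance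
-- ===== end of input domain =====

-- B replaces A's quadratic rescan of all backlink pairs by a bucket + prefix-max table of
-- cycle ends indexed by begin, giving an O(1) containment test per candidate (objective: faster).

-- ===== PORT A =====
-- itertools.combinations(xs, 2), its 2-tuples kept as pairs, in CPython's order
-- (structurally PySem.List.combinations specialised to r = 2)
def combos2 : List Int → List (Int × Int)
  | [] => []
  | x :: xs => xs.map (fun y => (x, y)) ++ combos2 xs

-- the index-collecting loop, identical in both Pythons
-- (A: defaultdict(list), entity_indexes[entity].append(i); B: setdefault(entity, []).append(i);
--  both are exactly d.modify entity [] (· ++ [i]) over enumerate(path))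
def buildIdx (path : List (String × String)) : PySem.Dict String (List Int) :=
  (PySem.List.enumerate path 0).foldl
    (fun d p => d.modify p.2.1 [] (fun v => v ++ [p.1])) PySem.Dict.empty

def get_root_cycles_py (path : List (String × String)) : List (Int × Int) :=
  let entity_indexes := buildIdx path
  if !(entity_indexes.values.any (fun ix => decide (1 < ix.length))) then []
  else
    let possible_backlinks := entity_indexes.values.flatMap combos2
    possible_backlinks.filter (fun c =>
      !(possible_backlinks.any (fun p => decide (p.1 < c.1) && decide (c.2 < p.2))))

-- ===== PORT B =====
-- loop body of "if best_end[g[0] + 1] < g[-1]: best_end[g[0] + 1] = g[-1]"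
-- (g[0] / g[-1] via pyGetD: every g in groups is nonempty, so the default is never read)
def bStep (B : List Int) (g : List Int) : List Int :=
  if PySem.List.pyGetD B (PySem.List.pyGetD g 0 0 + 1) (-1) < PySem.List.pyGetD g (-1) 0
  then PySem.List.pySetD B (PySem.List.pyGetD g 0 0 + 1) (PySem.List.pyGetD g (-1) 0)
  else B

-- loop body of "if best_end[i + 1] < best_end[i]: best_end[i + 1] = best_end[i]"
def pStep (B : List Int) (i : Int) : List Int :=
  if PySem.List.pyGetD B (i + 1) (-1) < PySem.List.pyGetD B i (-1)
  then PySem.List.pySetD B (i + 1) (PySem.List.pyGetD B i (-1))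
  else B

def get_root_cycles_py_alt (path : List (String × String)) : List (Int × Int) :=
  let entity_indexes := buildIdx path
  let groups := entity_indexes.values.filter (fun g => decide (1 < g.length))
  let n : Int := PySem.List.len path
  let best0 : List Int := PySem.List.pyRepeat [-1] (n + 1)
  let best1 := groups.foldl bStep best0
  let best := (PySem.List.pyRange 0 n 1).foldl pStep best1
  groups.foldl (fun acc g =>
    (combos2 g).foldl (fun acc c =>
      if PySem.List.pyGetD best c.1 (-1) ≤ c.2 then acc ++ [c] else acc) acc) []

-- ===== PRECONDITION & SPEC =====
def Spec_get_root_cycles_py (path : List (String × String)) (out : List (Int × Int)) : Prop := out = get_root_cycles_py_alt path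
instance (path : List (String × String)) (out : List (Int × Int)) : Decidable (Spec_get_root_cycles_py path out) := by unfold Spec_get_root_cycles_py; infer_instance

-- ===== CLAIM (what is proved, stated in full; the proofs are below) =====
def Claim_equal_get_root_cycles_py : Prop := ∀ (path : List (String × String)), Dom_get_root_cycles_py path → Spec_get_root_cycles_py path (get_root_cycles_py path)

-- ===== LEMMAS AND PROOFS =====

-- proof-only abbreviations for the pieces of B
def groupsOf (path : List (String × String)) : List (List Int) :=
  (buildIdx path).values.filter (fun g => decide (1 < g.length))

def bestTab (path : List (String × String)) : List Int :=
  (PySem.List.pyRange 0 (PySem.List.len path) 1).foldl pStep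
    ((groupsOf path).foldl bStep (PySem.List.pyRepeat [-1] (PySem.List.len path + 1)))

-- max of a list of ends, seeded with the sentinel -1 (the shape of B's running maxima)
def maxOf (l : List Int) : Int := l.foldl max (-1)

-- the (first, last) interval of each group, exactly as B reads them
def spans (gs : List (List Int)) : List (Int × Int) :=
  gs.map (fun g => (PySem.List.pyGetD g 0 0, PySem.List.pyGetD g (-1) 0))

-- value of the bucket pass at slot j, and of the finished prefix-max table at slot b
def bmax (gs : List (List Int)) (j : Int) : Int :=
  maxOf (((spans gs).filter (fun p => p.1 + 1 == j)).map (·.2))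
def pmax (gs : List (List Int)) (b : Int) : Int :=
  maxOf (((spans gs).filter (fun p => decide (p.1 < b))).map (·.2))

theorem foldl_max_shift (l : List Int) : ∀ a b : Int, l.foldl max (max a b) = max a (l.foldl max b) := by
  induction l with
  | nil => intro a b; simp
  | cons x t ih => intro a b; simp only [List.foldl_cons, max_assoc]; exact ih a (max b x)

theorem maxOf_cons (x : Int) (l : List Int) : maxOf (x :: l) = max x (maxOf l) := by
  simp only [maxOf, List.foldl_cons]
  rw [show max (-1 : Int) x = max x (-1) from max_comm _ _, foldl_max_shift]

theorem maxOf_lt_iff (l : List Int) (e : Int) (he : -1 ≤ e) : e < maxOf l ↔ ∃ x ∈ l, e < x := by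
  induction l with
  | nil =>
    rw [show maxOf [] = -1 from rfl]
    constructor
    · intro h; omega
    · rintro ⟨x, hx, -⟩; simp at hx
  | cons x t ih =>
    rw [maxOf_cons, lt_max_iff, ih]
    constructor
    · rintro (h | ⟨y, hy, hey⟩)
      · exact ⟨x, List.mem_cons_self, h⟩
      · exact ⟨y, List.mem_cons_of_mem _ hy, hey⟩
    · rintro ⟨y, hy, hey⟩
      rcases List.mem_cons.mp hy with rfl | hy'
      · exact Or.inl hey
      · exact Or.inr ⟨y, hy', hey⟩

theorem buildIdx_eq_mapfold (path : List (String × String)) : buildIdx path =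
    ((PySem.List.enumerate path 0).map (fun p => (p.2.1, p.1))).foldl
      (fun d q => d.modify q.1 [] (fun v => v ++ [q.2])) PySem.Dict.empty := by
  rw [List.foldl_map]
  rfl

theorem nodup_keys_buildIdx (path : List (String × String)) : (buildIdx path).keys.Nodup := by
  unfold buildIdx
  exact PySem.Dict.nodup_keys_foldl_modify_key (PySem.List.enumerate path 0)
    (fun p : Int × (String × String) => p.2.1) []
    (fun _ (x : Int × (String × String)) => fun v => v ++ [x.1]) PySem.Dict.empty
    (by simp [PySem.Dict.keys_empty])

theorem getD_buildIdx (path : List (String × String)) (k : String) :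
    (buildIdx path).getD k [] = ((PySem.List.enumerate path 0).filter (fun p => p.2.1 == k)).map (·.1) := by
  rw [buildIdx_eq_mapfold, PySem.Dict.getD_foldl_modify_append, PySem.Dict.getD_empty,
      List.nil_append, List.filter_map, List.map_map]
  rfl

theorem mem_values_buildIdx {path : List (String × String)} {g : List Int}
    (hg : g ∈ (buildIdx path).values) :
    ∃ k, g = ((PySem.List.enumerate path 0).filter (fun p => p.2.1 == k)).map (·.1) := by
  have hg' : g ∈ (buildIdx path).items.map (·.2) := hg
  rw [List.mem_map] at hg'
  obtain ⟨⟨k, v⟩, hmem, hvg⟩ := hg'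
  refine ⟨k, ?_⟩
  have h1 := PySem.Dict.get?_of_mem_items _ hmem (nodup_keys_buildIdx path)
  have h2 := PySem.Dict.getD_of_get?_eq_some _ [] h1
  rw [getD_buildIdx] at h2
  simp only at hvg
  rw [← hvg, ← h2]

theorem group_facts {path : List (String × String)} {g : List Int}
    (hg : g ∈ (buildIdx path).values) :
    g.Pairwise (· < ·) ∧ ∀ x ∈ g, 0 ≤ x ∧ x < (path.length : Int) := by
  obtain ⟨k, rfl⟩ := mem_values_buildIdx hg
  constructor
  · exact List.Pairwise.map _ (fun a b hab => hab)
      (List.Pairwise.filter _ (PySem.List.pairwise_lt_enumerate path 0))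
  · intro x hx
    rw [List.mem_map] at hx
    obtain ⟨p, hp, rfl⟩ := hx
    rw [List.mem_filter] at hp
    obtain ⟨kk, hkk, rfl⟩ := (PySem.List.mem_enumerate_iff _ _ _).mp hp.1
    simp only [zero_add]
    omega

theorem combos2_nil_of_short {g : List Int} (h : g.length ≤ 1) : combos2 g = [] := by
  match g, h with
  | [], _ => rfl
  | [x], _ => simp [combos2]

theorem combos2_subset : ∀ {g : List Int} {c : Int × Int}, c ∈ combos2 g → c.1 ∈ g ∧ c.2 ∈ g := by
  intro g
  induction g with
  | nil => intro c hc; simp [combos2] at hc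
  | cons x t ih =>
    intro c hc
    simp only [combos2, List.mem_append, List.mem_map] at hc
    rcases hc with ⟨y, hy, rfl⟩ | hc
    · exact ⟨List.mem_cons_self, List.mem_cons_of_mem _ hy⟩
    · exact ⟨List.mem_cons_of_mem _ (ih hc).1, List.mem_cons_of_mem _ (ih hc).2⟩

theorem sorted_bounds {g : List Int} (hs : g.Pairwise (· ≤ ·)) {x : Int} (hx : x ∈ g)
    (h : g ≠ []) : g.head h ≤ x ∧ x ≤ g.getLast h := by
  obtain ⟨i, hi, rfl⟩ := List.getElem_of_mem hx
  rw [List.pairwise_iff_getElem] at hs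
  rw [List.head_eq_getElem, List.getLast_eq_getElem]
  constructor
  · rcases Nat.eq_zero_or_pos i with h0 | h0
    · subst h0; exact le_refl _
    · exact hs 0 i (by omega) hi h0
  · rcases Nat.lt_or_ge i (g.length - 1) with hlt | hge
    · exact hs i (g.length - 1) hi (by omega) hlt
    · have : i = g.length - 1 := by omega
      subst this; exact le_refl _

theorem head_last_mem_combos2 {g : List Int} (h : 1 < g.length) (hne : g ≠ []) :
    (g.head hne, g.getLast hne) ∈ combos2 g := by
  match g, h with
  | a :: b :: t, _ =>
    have hbt : (b :: t) ≠ [] := by simp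
    rw [List.getLast_cons hbt]
    simp only [combos2, List.mem_append, List.mem_map, List.head_cons]
    exact Or.inl ⟨(b :: t).getLast hbt, List.getLast_mem hbt, rfl⟩

theorem pyGetD_head {g : List Int} (h : g ≠ []) : PySem.List.pyGetD g 0 0 = g.head h := by
  match g, h with
  | a :: t, _ => rw [PySem.List.pyGetD_zero_cons, List.head_cons]

-- pyGetD (pySetD …) at in-range nonnegative indices
theorem gset (B : List Int) (i j : Int) (v : Int) (hi0 : 0 ≤ i) (hi : i < (B.length : Int))
    (hj0 : 0 ≤ j) (hj : j < (B.length : Int)) :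
    PySem.List.pyGetD (PySem.List.pySetD B i v) j (-1) = if i = j then v else PySem.List.pyGetD B j (-1) := by
  rw [PySem.List.pySetD_of_nonneg _ _ hi0, PySem.List.pyGetD_of_nonneg _ _ hj0,
      PySem.List.pyGetD_of_nonneg _ _ hj0,
      List.getD_eq_getElem?_getD, List.getD_eq_getElem?_getD, List.getElem?_set]
  by_cases h : i = j
  · subst h
    simp [show i.toNat < B.length by omega]
  · have hne : ¬ i.toNat = j.toNat := by omega
    simp [hne, h]

theorem bStep_len (B g : List Int) : (bStep B g).length = B.length := by
  unfold bStep; split_ifs <;> simp [PySem.List.length_pySetD]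

theorem pStep_len (B : List Int) (i : Int) : (pStep B i).length = B.length := by
  unfold pStep; split_ifs <;> simp [PySem.List.length_pySetD]

theorem stage1_len : ∀ (gs : List (List Int)) (B : List Int), (gs.foldl bStep B).length = B.length := by
  intro gs
  induction gs with
  | nil => intro B; rfl
  | cons g t ih => intro B; rw [List.foldl_cons, ih, bStep_len]

theorem stage2_len : ∀ (m : Nat) (B : List Int),
    (((List.range m).map (fun k : Nat => (k : Int))).foldl pStep B).length = B.length := by
  intro m
  induction m with
  | zero => intro B; rfl
  | succ m ih =>
    intro B
    rw [List.range_succ, List.map_append, List.foldl_append, List.map_cons, List.map_nil,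
        List.foldl_cons, List.foldl_nil, pStep_len, ih]

theorem stage1_getD : ∀ (gs : List (List Int)) (B : List Int) (j : Int), 0 ≤ j → j < (B.length : Int) →
    (∀ g ∈ gs, 0 ≤ PySem.List.pyGetD g 0 0 ∧ PySem.List.pyGetD g 0 0 + 1 < (B.length : Int)) →
    PySem.List.pyGetD (gs.foldl bStep B) j (-1)
      = (((spans gs).filter (fun p => p.1 + 1 == j)).map (·.2)).foldl max (PySem.List.pyGetD B j (-1)) := by
  intro gs
  induction gs with
  | nil => intro B j hj0 hj _; simp [spans]
  | cons g t ih =>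
    intro B j hj0 hj hbound
    obtain ⟨hf0, hf1⟩ := hbound g List.mem_cons_self
    have hlen : ((bStep B g).length : Int) = (B.length : Int) := by rw [bStep_len]
    rw [List.foldl_cons,
        ih (bStep B g) j hj0 (by omega)
          (fun g' hg' => by rw [hlen]; exact hbound g' (List.mem_cons_of_mem _ hg'))]
    rw [show spans (g :: t)
        = (PySem.List.pyGetD g 0 0, PySem.List.pyGetD g (-1) 0) :: spans t from rfl]
    rw [List.filter_cons]
    by_cases hfj : PySem.List.pyGetD g 0 0 + 1 = j
    · rw [if_pos (by simpa using hfj), List.map_cons, List.foldl_cons]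
      have hbg : PySem.List.pyGetD (bStep B g) j (-1)
          = max (PySem.List.pyGetD B j (-1)) (PySem.List.pyGetD g (-1) 0) := by
        unfold bStep
        split_ifs with hc
        · rw [gset B _ j _ (by omega) (by omega) hj0 hj, if_pos hfj]
          rw [hfj] at hc
          omega
        · rw [hfj] at hc
          omega
      rw [hbg]
    · rw [if_neg (by simpa using hfj)]
      have hbg : PySem.List.pyGetD (bStep B g) j (-1) = PySem.List.pyGetD B j (-1) := by
        unfold bStep
        split_ifs with hc
        · rw [gset B _ j _ (by omega) (by omega) hj0 hj, if_neg hfj]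
        · rfl
      rw [hbg]

theorem pmax_zero {gs : List (List Int)} (hp : ∀ p ∈ spans gs, 0 ≤ p.1) :
    pmax gs 0 = -1 ∧ bmax gs 0 = -1 := by
  constructor
  · unfold pmax
    rw [List.filter_eq_nil_iff.mpr (by intro p hpm; have := hp p hpm; simp; omega)]
    rfl
  · unfold bmax
    rw [List.filter_eq_nil_iff.mpr (by intro p hpm; have := hp p hpm; simp; omega)]
    rfl

theorem maxsplit_aux : ∀ (pts : List (Int × Int)) (j : Int),
    maxOf ((pts.filter (fun p => decide (p.1 < j + 1))).map (·.2))
      = max (maxOf ((pts.filter (fun p => decide (p.1 < j))).map (·.2)))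
            (maxOf ((pts.filter (fun p => p.1 + 1 == j + 1)).map (·.2))) := by
  intro pts
  induction pts with
  | nil => intro j; simp [maxOf]
  | cons p t ih =>
    intro j
    simp only [List.filter_cons]
    rcases lt_trichotomy p.1 j with h | h | h
    · rw [if_pos (by simp; omega), if_pos (by simp; omega), if_neg (by simp; omega),
          List.map_cons, List.map_cons, maxOf_cons, maxOf_cons, ih j, max_assoc]
    · rw [if_pos (by simp; omega), if_neg (by simp; omega), if_pos (by simp; omega),
          List.map_cons, List.map_cons, maxOf_cons, maxOf_cons, ih j, max_left_comm]
    · rw [if_neg (by simp; omega), if_neg (by simp; omega), if_neg (by simp; omega)]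
      exact ih j

theorem maxsplit (gs : List (List Int)) (j : Int) :
    pmax gs (j + 1) = max (pmax gs j) (bmax gs (j + 1)) := by
  unfold pmax bmax
  exact maxsplit_aux (spans gs) j

theorem stage2 (gs : List (List Int)) :
    ∀ (m : Nat) (B : List Int), (m : Int) < (B.length : Int) →
    (∀ j : Int, 0 ≤ j → j < (B.length : Int) →
        PySem.List.pyGetD B j (-1) = if j ≤ 0 then pmax gs j else bmax gs j) →
    ∀ j : Int, 0 ≤ j → j < (B.length : Int) →
    PySem.List.pyGetD (((List.range m).map (fun k : Nat => (k : Int))).foldl pStep B) j (-1)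
      = if j ≤ (m : Int) then pmax gs j else bmax gs j := by
  intro m
  induction m with
  | zero => intro B hm hB j hj0 hj; simpa using hB j hj0 hj
  | succ m ih =>
    intro B hm hB j hj0 hj
    push_cast at hm
    rw [List.range_succ, List.map_append, List.foldl_append, List.map_cons, List.map_nil,
        List.foldl_cons, List.foldl_nil]
    have hlenBm : ((((List.range m).map (fun k : Nat => (k : Int))).foldl pStep B).length : Int)
        = (B.length : Int) := by rw [stage2_len]
    have hIH : ∀ j : Int, 0 ≤ j → j < (B.length : Int) →
        PySem.List.pyGetD (((List.range m).map (fun k : Nat => (k : Int))).foldl pStep B) j (-1)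
          = if j ≤ (m : Int) then pmax gs j else bmax gs j :=
      fun j hj0 hj => ih B (by omega) hB j hj0 hj
    have hm0 : PySem.List.pyGetD (((List.range m).map (fun k : Nat => (k : Int))).foldl pStep B) (m : Int) (-1)
        = pmax gs (m : Int) := by
      rw [hIH (m : Int) (by omega) (by omega), if_pos (le_refl _)]
    have hm1 : PySem.List.pyGetD (((List.range m).map (fun k : Nat => (k : Int))).foldl pStep B) ((m : Int) + 1) (-1)
        = bmax gs ((m : Int) + 1) := by
      rw [hIH ((m : Int) + 1) (by omega) (by omega), if_neg (by omega)]
    set Bm := ((List.range m).map (fun k : Nat => (k : Int))).foldl pStep B with hBmeq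
    unfold pStep
    rw [hm0, hm1]
    by_cases hc : bmax gs ((m : Int) + 1) < pmax gs (m : Int)
    · rw [if_pos hc, gset Bm ((m : Int) + 1) j _ (by omega) (by omega) hj0 (by omega)]
      by_cases hje : (m : Int) + 1 = j
      · rw [if_pos hje, if_pos (by push_cast; omega), ← hje, maxsplit]
        exact (max_eq_left hc.le).symm
      · rw [if_neg hje, hIH j hj0 hj]
        by_cases hjm : j ≤ (m : Int)
        · rw [if_pos hjm, if_pos (by push_cast; omega)]
        · rw [if_neg hjm, if_neg (by push_cast; omega)]
    · rw [if_neg hc, hIH j hj0 hj]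
      by_cases hjm : j ≤ (m : Int)
      · rw [if_pos hjm, if_pos (by push_cast; omega)]
      · by_cases hje : j = (m : Int) + 1
        · rw [if_neg hjm, if_pos (by push_cast; omega), hje, maxsplit]
          exact (max_eq_right (not_lt.mp hc)).symm
        · rw [if_neg hjm, if_neg (by push_cast; omega)]

theorem flatMap_filter_combos2 : ∀ (vs : List (List Int)),
    (vs.filter (fun g => decide (1 < g.length))).flatMap combos2 = vs.flatMap combos2 := by
  intro vs
  induction vs with
  | nil => rfl
  | cons v t ih =>
    rw [List.filter_cons]
    by_cases h : 1 < v.length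
    · rw [if_pos (by simpa using h), List.flatMap_cons, List.flatMap_cons, ih]
    · rw [if_neg (by simpa using h), List.flatMap_cons, combos2_nil_of_short (by omega),
          List.nil_append, ih]

theorem groups_facts {path : List (String × String)} {g : List Int} (hg : g ∈ groupsOf path) :
    1 < g.length ∧ g.Pairwise (· ≤ ·) ∧ (∀ x ∈ g, 0 ≤ x ∧ x < (path.length : Int)) := by
  rw [groupsOf, List.mem_filter] at hg
  obtain ⟨hv, hlen⟩ := hg
  have h := group_facts hv
  exact ⟨by simpa using hlen, h.1.imp (fun h => le_of_lt h), h.2⟩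

theorem spans_first_nonneg {path : List (String × String)} :
    ∀ p ∈ spans (groupsOf path), 0 ≤ p.1 ∧ p.1 < (path.length : Int) := by
  intro p hp
  rw [spans, List.mem_map] at hp
  obtain ⟨g, hg, rfl⟩ := hp
  obtain ⟨h1, _, hb⟩ := groups_facts hg
  have hne : g ≠ [] := by intro h; subst h; simp at h1
  rw [pyGetD_head hne]
  exact hb _ (List.head_mem hne)

-- the finished prefix-max table reads back pmax at every in-range begin
theorem bestTab_getD (path : List (String × String)) :
    ∀ b : Int, 0 ≤ b → b < (path.length : Int) →
    PySem.List.pyGetD (bestTab path) b (-1) = pmax (groupsOf path) b := by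
  intro b hb0 hb
  have hrep : PySem.List.pyRepeat [(-1 : Int)] (PySem.List.len path + 1)
      = List.replicate (path.length + 1) (-1) := by
    rw [PySem.List.pyRepeat_singleton]
    congr 1
  have hb0len : ((List.replicate (path.length + 1) (-1 : Int)).length : Int)
      = (path.length : Int) + 1 := by simp
  have hb0get : ∀ j : Int, 0 ≤ j → j < (path.length : Int) + 1 →
      PySem.List.pyGetD (List.replicate (path.length + 1) (-1 : Int)) j (-1) = -1 := by
    intro j hj0 hj
    rw [PySem.List.pyGetD_of_nonneg _ _ hj0, List.getD_eq_getElem?_getD, List.getElem?_replicate,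
        if_pos (by omega)]
    rfl
  -- stage 1 result
  have hbound : ∀ g ∈ groupsOf path, 0 ≤ PySem.List.pyGetD g 0 0 ∧
      PySem.List.pyGetD g 0 0 + 1 < ((List.replicate (path.length + 1) (-1 : Int)).length : Int) := by
    intro g hg
    obtain ⟨h1, _, hbnd⟩ := groups_facts hg
    have hne : g ≠ [] := by intro h; subst h; simp at h1
    rw [pyGetD_head hne]
    have := hbnd _ (List.head_mem hne)
    constructor
    · exact this.1
    · rw [hb0len]; omega
  have hs1len : (((groupsOf path).foldl bStep (List.replicate (path.length + 1) (-1 : Int))).length : Int)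
      = (path.length : Int) + 1 := by rw [stage1_len]; exact hb0len
  have hs1 : ∀ j : Int, 0 ≤ j → j < (path.length : Int) + 1 →
      PySem.List.pyGetD ((groupsOf path).foldl bStep (List.replicate (path.length + 1) (-1 : Int))) j (-1)
        = if j ≤ 0 then pmax (groupsOf path) j else bmax (groupsOf path) j := by
    intro j hj0 hj
    rw [stage1_getD _ _ j hj0 (by omega) hbound, hb0get j hj0 hj]
    by_cases hj00 : j ≤ 0
    · have : j = 0 := by omega
      subst this
      rw [if_pos (le_refl _)]
      have hz := pmax_zero (gs := groupsOf path) (fun p hp => (spans_first_nonneg p hp).1)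
      rw [hz.1]
      have : ((spans (groupsOf path)).filter (fun p => p.1 + 1 == (0 : Int))) = [] := by
        rw [List.filter_eq_nil_iff]
        intro p hp
        have := (spans_first_nonneg p hp).1
        simp only [beq_iff_eq]
        omega
      rw [this]
      rfl
    · rw [if_neg hj00]
      rfl
  -- stage 2
  have h2 := stage2 (groupsOf path) path.length
    ((groupsOf path).foldl bStep (List.replicate (path.length + 1) (-1 : Int)))
    (by omega) (fun j hj0 hj => hs1 j hj0 (by omega)) b hb0 (by omega)
  rw [if_pos (by omega)] at h2
  unfold bestTab
  rw [hrep, PySem.List.pyRange_one]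
  simp only [PySem.List.len_eq, sub_zero, Int.toNat_natCast, zero_add]
  exact h2

-- A's whole-list dominance scan agrees with B's prefix-max lookup on every candidate
theorem dominance_iff (path : List (String × String)) (c : Int × Int)
    (hc : c ∈ (groupsOf path).flatMap combos2) :
    ((groupsOf path).flatMap combos2).any (fun p => decide (p.1 < c.1) && decide (c.2 < p.2))
      = decide (c.2 < PySem.List.pyGetD (bestTab path) c.1 (-1)) := by
  obtain ⟨g0, hg0, hcg0⟩ := List.mem_flatMap.mp hc
  obtain ⟨hl0, hs0, hb0⟩ := groups_facts hg0
  have hc1 := (combos2_subset hcg0).1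
  have hc2 := (combos2_subset hcg0).2
  have hc1b := hb0 _ hc1
  have hc2b := hb0 _ hc2
  rw [bestTab_getD path c.1 hc1b.1 hc1b.2]
  rw [Bool.eq_iff_iff, List.any_eq_true, decide_eq_true_iff]
  unfold pmax
  rw [maxOf_lt_iff _ _ (by omega)]
  constructor
  · rintro ⟨p, hp, hpq⟩
    rw [Bool.and_eq_true, decide_eq_true_iff, decide_eq_true_iff] at hpq
    obtain ⟨g, hg, hpg⟩ := List.mem_flatMap.mp hp
    obtain ⟨hl, hs, hb⟩ := groups_facts hg
    have hne : g ≠ [] := by intro h; subst h; simp at hl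
    have hp1 := (combos2_subset hpg).1
    have hp2 := (combos2_subset hpg).2
    refine ⟨PySem.List.pyGetD g (-1) 0, ?_, ?_⟩
    · rw [List.mem_map]
      refine ⟨(PySem.List.pyGetD g 0 0, PySem.List.pyGetD g (-1) 0), ?_, rfl⟩
      rw [List.mem_filter]
      constructor
      · rw [spans, List.mem_map]; exact ⟨g, hg, rfl⟩
      · simp only [decide_eq_true_iff]
        have := (sorted_bounds hs hp1 hne).1
        rw [pyGetD_head hne]
        omega
    · have := (sorted_bounds hs hp2 hne).2
      rw [PySem.List.pyGetD_neg_one (h := hne)]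
      omega
  · rintro ⟨x, hx, hcx⟩
    rw [List.mem_map] at hx
    obtain ⟨p, hpf, rfl⟩ := hx
    rw [List.mem_filter] at hpf
    obtain ⟨hpsp, hplt⟩ := hpf
    rw [spans, List.mem_map] at hpsp
    obtain ⟨g, hg, rfl⟩ := hpsp
    obtain ⟨hl, hs, hb⟩ := groups_facts hg
    have hne : g ≠ [] := by intro h; subst h; simp at hl
    refine ⟨(g.head hne, g.getLast hne), ?_, ?_⟩
    · exact List.mem_flatMap.mpr ⟨g, hg, head_last_mem_combos2 hl hne⟩
    · simp only [decide_eq_true_iff] at hplt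
      rw [pyGetD_head hne] at hplt
      rw [PySem.List.pyGetD_neg_one (h := hne)] at hcx
      simp only [Bool.and_eq_true, decide_eq_true_iff]
      exact ⟨hplt, hcx⟩

theorem a_eq (path : List (String × String)) : get_root_cycles_py path
    = if !((buildIdx path).values.any (fun ix => decide (1 < ix.length))) then []
      else ((buildIdx path).values.flatMap combos2).filter
        (fun c => !(((buildIdx path).values.flatMap combos2).any
          (fun p => decide (p.1 < c.1) && decide (c.2 < p.2)))) := rfl

theorem pb_eq (path : List (String × String)) :
    (groupsOf path).flatMap combos2 = (buildIdx path).values.flatMap combos2 :=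
  flatMap_filter_combos2 _

theorem alt_filter (path : List (String × String)) : get_root_cycles_py_alt path
    = ((groupsOf path).flatMap combos2).filter
        (fun c => !(decide (c.2 < PySem.List.pyGetD (bestTab path) c.1 (-1)))) := by
  have h0 : get_root_cycles_py_alt path = (groupsOf path).foldl (fun acc g =>
      (combos2 g).foldl (fun acc c =>
        if PySem.List.pyGetD (bestTab path) c.1 (-1) ≤ c.2 then acc ++ [c] else acc) acc) [] := rfl
  rw [h0]
  have h1 : (groupsOf path).foldl (fun acc g =>
      (combos2 g).foldl (fun acc c =>
        if PySem.List.pyGetD (bestTab path) c.1 (-1) ≤ c.2 then acc ++ [c] else acc) acc) []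
      = (groupsOf path).foldl (fun acc g =>
          acc ++ (combos2 g).filter
            (fun c => decide (PySem.List.pyGetD (bestTab path) c.1 (-1) ≤ c.2))) [] :=
    PySem.List.foldl_congr_mem _ _ _ _
      (fun acc g _ => PySem.List.foldl_append_ite_eq_filter _ _ acc)
  rw [h1, PySem.List.foldl_append_eq_flatMap, List.nil_append, ← List.filter_flatMap]
  apply List.filter_congr
  intro c _
  rw [← decide_not]
  exact decide_eq_decide.mpr not_lt.symm

theorem get_root_cycles_py_spec' (path : List (String × String)) :
    get_root_cycles_py path = get_root_cycles_py_alt path := by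
  rw [a_eq, alt_filter, ← pb_eq]
  by_cases hA : (buildIdx path).values.any (fun ix => decide (1 < ix.length))
  · rw [if_neg (by simp [hA])]
    apply List.filter_congr
    intro c hc
    rw [dominance_iff path c hc]
  · rw [if_pos (by rw [Bool.not_eq_true] at hA; simp [hA])]
    have hA' : (buildIdx path).values.any (fun ix => decide (1 < ix.length)) = false := by
      rw [← Bool.not_eq_true]; exact hA
    have hg : groupsOf path = [] :=
      List.filter_eq_nil_iff.mpr (List.any_eq_false.mp hA')
    rw [hg]
    rfl

-- ===== VERDICT (by name: the statement is the Claim_ definition above) =====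
theorem get_root_cycles_py_spec : Claim_equal_get_root_cycles_py := by
  intro path _
  exact get_root_cycles_py_spec' path
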